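-- pv_equiv track=rewrite | github.com/Dhruv1969Karnwal/icons-data | mermaid/renderers/mermaid_renderer.py | _get_critical_path_nodes
-- ===== SOURCE A (Python) =====
-- from typing import Dict, List, Optional
--
-- def _get_critical_path_nodes(json_ir: Dict) -> set:
--     """Identify critical path components (high in/out degree)."""
--     nodes = json_ir.get("nodes", [])
--     edges = json_ir.get("edges", [])
--
--     # Count node connections
--     node_degrees = {node["id"]: 0 for node in nodes}
--     for edge in edges:
--         if "from" in edge and "to" in edge:
--             node_degrees[edge["from"]] = node_degrees.get(edge["from"], 0) + 1
--             node_degrees[edge["to"]] = node_degrees.get(edge["to"], 0) + 1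
--
--     # Top 30% most connected nodes are critical
--     sorted_nodes = sorted(node_degrees.items(), key=lambda x: x[1], reverse=True)
--     critical_count = max(1, len(sorted_nodes) // 3)
--     return {node_id for node_id, _ in sorted_nodes[:critical_count]}
-- ===== SOURCE B (Python) =====
-- def _get_critical_path_nodes(json_ir):
--     """Identify critical path components (high in/out degree)."""
--     nodes = json_ir.get("nodes", [])
--     edges = json_ir.get("edges", [])
--
--     # Degree counting: collect the endpoint stream of valid edges, then count it.
--     endpoints = [edge[k] for edge in edges if "from" in edge and "to" in edge
--                  for k in ("from", "to")]
--     node_degrees = {node["id"]: 0 for node in nodes}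
--     for p in endpoints:
--         node_degrees[p] = node_degrees.get(p, 0) + 1
--
--     # Counting sort by degree, descending; insertion order kept inside each bucket.
--     buckets = {}
--     for node_id, deg in node_degrees.items():
--         buckets.setdefault(deg, []).append(node_id)
--     order = []
--     if buckets:
--         for deg in range(max(buckets), -1, -1):
--             order += buckets.get(deg, [])
--
--     critical_count = max(1, len(node_degrees) // 3)
--     return set(order[:critical_count])
-- ===== Notes on version B (the rewrite author's own statement) =====
-- stated objective: alternative
-- what changed: B builds the endpoint stream of valid edges once and counts over it, then replaces the comparison sort of the degree table by a counting sort into per-degree buckets walked from the maximum degree down to 0; preserving insertion order inside each bucket reproduces the stable descending order exactly.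
import Mathlib
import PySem

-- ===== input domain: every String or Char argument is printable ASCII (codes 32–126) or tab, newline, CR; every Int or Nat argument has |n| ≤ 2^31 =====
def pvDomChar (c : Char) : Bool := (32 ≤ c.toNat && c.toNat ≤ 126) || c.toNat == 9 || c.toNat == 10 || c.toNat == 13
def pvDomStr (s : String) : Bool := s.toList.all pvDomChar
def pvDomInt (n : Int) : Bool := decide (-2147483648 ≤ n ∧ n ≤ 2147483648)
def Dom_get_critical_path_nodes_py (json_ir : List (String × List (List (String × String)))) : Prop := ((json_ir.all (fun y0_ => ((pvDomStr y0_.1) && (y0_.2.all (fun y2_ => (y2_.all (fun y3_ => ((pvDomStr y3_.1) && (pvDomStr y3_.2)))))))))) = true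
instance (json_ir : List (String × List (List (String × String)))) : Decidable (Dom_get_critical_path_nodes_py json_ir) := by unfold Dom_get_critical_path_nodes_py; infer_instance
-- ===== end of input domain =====

-- B replaces the comparison sort of the degree table by a counting sort into per-degree
-- buckets walked from the maximum degree down (objective: alternative decomposition).

-- ===== PORT A =====
def get_critical_path_nodes_py (json_ir : List (String × List (List (String × String)))) : List String :=
  let jd := PySem.Dict.ofList json_ir
  let nodes := jd.getD "nodes" []
  let edges := jd.getD "edges" []
  -- {node["id"]: 0 for node in nodes}; a node without "id" (Python KeyError) is excluded by Pre_
  let deg0 : PySem.Dict String Int :=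
    nodes.foldl (fun d node => d.insert (((PySem.Dict.ofList node).get? "id").getD "") 0) PySem.Dict.empty
  let node_degrees : PySem.Dict String Int :=
    edges.foldl (fun d edge =>
      let e := PySem.Dict.ofList edge
      if e.contains "from" && e.contains "to" then
        let d1 := d.insert (e.getD "from" "") (d.getD (e.getD "from" "") 0 + 1)
        d1.insert (e.getD "to" "") (d1.getD (e.getD "to" "") 0 + 1)
      else d) deg0
  let sorted_nodes := PySem.List.sorted node_degrees.items (fun x => x.2) true
  let critical_count := max 1 (sorted_nodes.length / 3)
  PySem.Set.ofList ((sorted_nodes.take critical_count).map (fun x => x.1))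

-- ===== PORT B =====
def get_critical_path_nodes_py_alt (json_ir : List (String × List (List (String × String)))) : List String :=
  let jd := PySem.Dict.ofList json_ir
  let nodes := jd.getD "nodes" []
  let edges := jd.getD "edges" []
  -- endpoint stream of the edges that carry both "from" and "to"
  let endpoints : List String :=
    (edges.filter (fun edge =>
        (PySem.Dict.ofList edge).contains "from" && (PySem.Dict.ofList edge).contains "to")).flatMap
      (fun edge => [(PySem.Dict.ofList edge).getD "from" "", (PySem.Dict.ofList edge).getD "to" ""])
  -- {node["id"]: 0 for node in nodes}; a node without "id" (Python KeyError) is excluded by Pre_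
  let deg0 : PySem.Dict String Int :=
    nodes.foldl (fun d node => d.insert (((PySem.Dict.ofList node).get? "id").getD "") 0) PySem.Dict.empty
  let node_degrees := endpoints.foldl (fun d p => d.modify p 0 (· + 1)) deg0
  -- counting sort: per-degree buckets in insertion order, walked from max(buckets) down to 0
  let buckets : PySem.Dict Int (List String) :=
    node_degrees.items.foldl (fun b x => b.modify x.2 [] (· ++ [x.1])) PySem.Dict.empty
  let order : List String :=
    match PySem.List.max? buckets.keys (fun d => d) with
    | none => []
    | some m => (PySem.List.pyRange m (-1) (-1)).foldl (fun acc d => acc ++ buckets.getD d []) []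
  let critical_count := max 1 (node_degrees.size / 3)
  PySem.Set.ofList (order.take critical_count)

-- ===== PRECONDITION & SPEC =====
-- Pre_ excludes exactly the inputs where some entry of the "nodes" list lacks an "id" key:
-- there Python A (and B) raise KeyError.
def Pre_get_critical_path_nodes_py (json_ir : List (String × List (List (String × String)))) : Prop :=
  ∀ node ∈ (PySem.Dict.ofList json_ir).getD "nodes" [], (PySem.Dict.ofList node).contains "id" = true
instance (json_ir : List (String × List (List (String × String)))) : Decidable (Pre_get_critical_path_nodes_py json_ir) := by unfold Pre_get_critical_path_nodes_py; infer_instance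

def pvWitness_get_critical_path_nodes_py : (List (String × List (List (String × String)))) :=
  [("nodes", [[("id","a")],[("id","b")],[("id","c")]]), ("edges", [[("from","a"),("to","b")]])]

def Spec_get_critical_path_nodes_py (json_ir : List (String × List (List (String × String)))) (out : List String) : Prop := out = get_critical_path_nodes_py_alt json_ir
instance (json_ir : List (String × List (List (String × String)))) (out : List String) : Decidable (Spec_get_critical_path_nodes_py json_ir out) := by unfold Spec_get_critical_path_nodes_py; infer_instance

-- ===== CLAIM (what is proved, stated in full; the proofs are below) =====
def Claim_equal_get_critical_path_nodes_py : Prop := ∀ (json_ir : List (String × List (List (String × String)))), Dom_get_critical_path_nodes_py json_ir → Pre_get_critical_path_nodes_py json_ir → Spec_get_critical_path_nodes_py json_ir (get_critical_path_nodes_py json_ir)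

-- ===== LEMMAS AND PROOFS =====

-- insertBy on a split list
theorem pv_insertBy_split {α : Type} (before : α → α → Bool) (x : α) (A B : List α)
    (hA : ∀ y ∈ A, before x y = false) (hB : ∀ y ∈ B, before x y = true) :
    PySem.List.insertBy before x (A ++ B) = A ++ x :: B := by
  induction A with
  | nil =>
    cases B with
    | nil => simp [PySem.List.insertBy]
    | cons b B' => simp [PySem.List.insertBy, hB b (by simp)]
  | cons a A' ih =>
    have ha := hA a (by simp)
    simp only [List.cons_append, PySem.List.insertBy, ha]
    simp [ih (fun y hy => hA y (by simp [hy]))]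

-- core stability lemma: bucket concatenation along a strictly descending key list
-- IS Python's stable descending sort
theorem pv_flatMap_filter_eq_sorted (ds : List Int) (hds : ds.Pairwise (fun a b => b < a)) :
    ∀ (items : List (String × Int)), (∀ x ∈ items, x.2 ∈ ds) →
    ds.flatMap (fun d => items.filter (fun x => x.2 == d)) =
      PySem.List.sorted items (fun x => x.2) true := by
  intro items
  induction items using List.reverseRecOn with
  | nil => intro _; simp [PySem.List.sorted]
  | append_singleton xs x ih =>
    intro hmem
    have hx : x.2 ∈ ds := hmem x (by simp)
    obtain ⟨ds1, ds2, rfl⟩ := List.append_of_mem hx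
    have hpw := hds
    rw [List.pairwise_append] at hpw
    obtain ⟨h1, h23, hcross⟩ := hpw
    have h2 : ∀ d ∈ ds2, d < x.2 := (List.pairwise_cons.mp h23).1
    have h1' : ∀ d ∈ ds1, x.2 < d := fun d hd => hcross d hd x.2 (by simp)
    have ihe := ih (fun y hy => hmem y (by simp [hy]))
    rw [PySem.List.sorted_rev_eq_foldl_insertBy, List.foldl_append] at *
    simp only [List.foldl_cons, List.foldl_nil]
    rw [← PySem.List.sorted_rev_eq_foldl_insertBy] at *
    rw [← ihe]
    -- rewrite filters of xs ++ [x]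
    have hfilt : ∀ d : Int, (xs ++ [x]).filter (fun p => p.2 == d) =
        xs.filter (fun p => p.2 == d) ++ if x.2 == d then [x] else [] := by
      intro d; rw [List.filter_append]
      cases h : x.2 == d <;> simp [List.filter, h]
    have hsame : ∀ d : Int, d ≠ x.2 → (xs ++ [x]).filter (fun p => p.2 == d) =
        xs.filter (fun p => p.2 == d) := by
      intro d hd; rw [hfilt]
      have : (x.2 == d) = false := beq_false_of_ne (fun h => hd h.symm)
      simp [this]
    have hmid : (xs ++ [x]).filter (fun p => p.2 == x.2) =
        xs.filter (fun p => p.2 == x.2) ++ [x] := by rw [hfilt]; simp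
    rw [List.flatMap_append, List.flatMap_cons, List.flatMap_append, List.flatMap_cons, hmid]
    have hds1 : ds1.flatMap (fun d => (xs ++ [x]).filter (fun p => p.2 == d)) =
        ds1.flatMap (fun d => xs.filter (fun p => p.2 == d)) := by
      apply List.flatMap_congr <;> intro d hd
      · exact hsame d (by have := h1' d hd; omega)
    have hds2 : ds2.flatMap (fun d => (xs ++ [x]).filter (fun p => p.2 == d)) =
        ds2.flatMap (fun d => xs.filter (fun p => p.2 == d)) := by
      apply List.flatMap_congr <;> intro d hd
      · exact hsame d (by have := h2 d hd; omega)
    rw [hds1, hds2]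
    have hA : ∀ y ∈ ds1.flatMap (fun d => xs.filter (fun p => p.2 == d)) ++
        xs.filter (fun p => p.2 == x.2), (fun a b => decide (b.2 < a.2)) x y = false := by
      intro y hy
      simp only [List.mem_append, List.mem_flatMap, List.mem_filter] at hy
      rcases hy with ⟨d, hd, _, hyd⟩ | ⟨_, hyd⟩
      · have : y.2 = d := by exact_mod_cast beq_iff_eq.mp hyd
        have := h1' d hd
        simp only [decide_eq_false_iff_not]; omega
      · have : y.2 = x.2 := by exact_mod_cast beq_iff_eq.mp hyd
        simp only [decide_eq_false_iff_not]; omega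
    have hB : ∀ y ∈ ds2.flatMap (fun d => xs.filter (fun p => p.2 == d)),
        (fun a b => decide (b.2 < a.2)) x y = true := by
      intro y hy
      simp only [List.mem_flatMap, List.mem_filter] at hy
      obtain ⟨d, hd, _, hyd⟩ := hy
      have : y.2 = d := by exact_mod_cast beq_iff_eq.mp hyd
      have := h2 d hd
      simp only [decide_eq_true_eq]; omega
    have key := pv_insertBy_split (fun a b => decide (b.2 < a.2)) x
      (ds1.flatMap (fun d => xs.filter (fun p => p.2 == d)) ++ xs.filter (fun p => p.2 == x.2))
      (ds2.flatMap (fun d => xs.filter (fun p => p.2 == d))) hA hB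
    simp only [List.append_assoc] at key ⊢
    rw [key]
    simp

theorem pv_deg_eq (edges : List (List (String × String))) (d0 : PySem.Dict String Int) :
    edges.foldl (fun d edge =>
      if (PySem.Dict.ofList edge).contains "from" && (PySem.Dict.ofList edge).contains "to" then
        (d.insert ((PySem.Dict.ofList edge).getD "from" "")
            (d.getD ((PySem.Dict.ofList edge).getD "from" "") 0 + 1)).insert
          ((PySem.Dict.ofList edge).getD "to" "")
          ((d.insert ((PySem.Dict.ofList edge).getD "from" "")
              (d.getD ((PySem.Dict.ofList edge).getD "from" "") 0 + 1)).getD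
            ((PySem.Dict.ofList edge).getD "to" "") 0 + 1)
      else d) d0
    = ((edges.filter (fun edge =>
          (PySem.Dict.ofList edge).contains "from" && (PySem.Dict.ofList edge).contains "to")).flatMap
        (fun edge => [(PySem.Dict.ofList edge).getD "from" "", (PySem.Dict.ofList edge).getD "to" ""])).foldl
        (fun d p => d.modify p 0 (· + 1)) d0 := by
  rw [List.foldl_flatMap, PySem.List.foldl_if_eq_foldl_filter]
  rfl

theorem pv_getD_deg0 (nodes : List (List (String × String))) :
    ∀ (d : PySem.Dict String Int), (∀ k, d.getD k 0 = 0) →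
    ∀ k, (nodes.foldl (fun d node =>
        d.insert (((PySem.Dict.ofList node).get? "id").getD "") 0) d).getD k 0 = 0 := by
  induction nodes with
  | nil => intro d h k; exact h k
  | cons n ns ih =>
    intro d h k
    refine ih _ (fun k' => ?_) k
    rw [PySem.Dict.getD_insert]
    split <;> simp [h]


-- ===== VERDICT (by name: the statement is the Claim_ definition above) =====
theorem get_critical_path_nodes_py_spec : Claim_equal_get_critical_path_nodes_py := by
  intro json_ir _ _
  show get_critical_path_nodes_py json_ir = get_critical_path_nodes_py_alt json_ir
  simp only [get_critical_path_nodes_py, get_critical_path_nodes_py_alt]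
  rw [pv_deg_eq]
  set nodes := (PySem.Dict.ofList json_ir).getD "nodes" [] with hnodes
  set edges := (PySem.Dict.ofList json_ir).getD "edges" [] with hedges
  set deg0 : PySem.Dict String Int := nodes.foldl (fun d node =>
      d.insert (((PySem.Dict.ofList node).get? "id").getD "") 0) PySem.Dict.empty with hdeg0
  set eps : List String := (edges.filter (fun edge =>
      (PySem.Dict.ofList edge).contains "from" && (PySem.Dict.ofList edge).contains "to")).flatMap
      (fun edge => [(PySem.Dict.ofList edge).getD "from" "", (PySem.Dict.ofList edge).getD "to" ""]) with heps
  set nd : PySem.Dict String Int := eps.foldl (fun d p => d.modify p 0 (· + 1)) deg0 with hnd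
  set bk : PySem.Dict Int (List String) :=
    nd.items.foldl (fun b x => b.modify x.2 [] (· ++ [x.1])) PySem.Dict.empty with hbk
  -- key facts about the degree dictionary
  have hnodup : nd.keys.Nodup := by
    rw [hnd]
    exact PySem.Dict.nodup_keys_foldl_modify_key eps (fun p => p) 0 (fun _ _ v => v + 1) deg0
      (PySem.Dict.nodup_keys_foldl_insert_key nodes
        (fun node => ((PySem.Dict.ofList node).get? "id").getD "") (fun _ _ => 0)
        PySem.Dict.empty PySem.Dict.nodup_keys_empty)
  have hdeg0 : ∀ k, deg0.getD k 0 = 0 :=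
    pv_getD_deg0 nodes PySem.Dict.empty (fun k => rfl)
  have hgetD : ∀ k, nd.getD k 0 = (eps.count k : Int) := by
    intro k
    rw [hnd, PySem.Dict.getD_foldl_modify_add_one, hdeg0 k, zero_add]
  have hnonneg : ∀ p ∈ nd.items, 0 ≤ p.2 := by
    intro p hp
    have := PySem.Dict.getD_of_mem_items nd (k := p.1) (v := p.2) (by exact hp) hnodup 0
    rw [hgetD p.1] at this
    omega
  -- the buckets dictionary: contents and keys
  have hbget : ∀ c : Int, bk.getD c [] =
      (nd.items.filter (fun p => p.2 == c)).map (fun p => p.1) := by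
    intro c
    have hswap : bk = (nd.items.map Prod.swap).foldl
        (fun b p => b.modify p.1 [] (· ++ [p.2])) PySem.Dict.empty := by
      rw [List.foldl_map]; rfl
    rw [hswap, PySem.Dict.getD_foldl_modify_append]
    simp [List.filter_map, Function.comp_def]
  have hkeys : bk.keys = PySem.Set.ofList (nd.items.map (fun p => p.2)) := by
    rw [hbk]
    rw [PySem.Dict.keys_foldl_modify_key nd.items (fun p => p.2) [] (fun _ p v => v ++ [p.1])
      PySem.Dict.empty]
    rw [PySem.Dict.keys_empty, PySem.Set.update_nil_left]
  -- empty / nonempty degree table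
  cases hitems : nd.items with
  | nil =>
    have hbkempty : bk = PySem.Dict.empty := by rw [hbk, hitems]; rfl
    simp [hitems, hbkempty, PySem.List.sorted, PySem.Dict.size, PySem.Dict.keys_empty,
      PySem.List.max?]
  | cons p0 rest =>
    rw [← hitems]
    have hne : bk.keys ≠ [] := by
      rw [hkeys]
      have : p0.2 ∈ PySem.Set.ofList (nd.items.map (fun p => p.2)) := by
        rw [PySem.Set.mem_ofList]
        exact List.mem_map_of_mem (by rw [hitems]; simp)
      exact List.ne_nil_of_mem this
    cases hmax : PySem.List.max? bk.keys (fun d => d) with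
    | none => exact absurd ((PySem.List.max?_eq_none_iff _ _).mp hmax) hne
    | some m =>
      have hub : ∀ y ∈ bk.keys, y ≤ m := PySem.List.max?_isMax hmax
      have hmemkeys : ∀ p ∈ nd.items, p.2 ∈ bk.keys := by
        intro p hp
        rw [hkeys, PySem.Set.mem_ofList]
        exact List.mem_map_of_mem hp
      -- the descending degree list [m, m-1, …, 0]
      have hds_pw : (PySem.List.pyRange m (-1) (-1)).Pairwise (fun a b => b < a) := by
        rw [PySem.List.pyRange_neg_one]
        refine List.Pairwise.map _ (fun a b h => ?_) List.pairwise_lt_range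
        omega
      have hmemds : ∀ p ∈ nd.items, p.2 ∈ PySem.List.pyRange m (-1) (-1) := by
        intro p hp
        rw [PySem.List.mem_pyRange_neg_one]
        exact ⟨by have := hnonneg p hp; omega, hub p.2 (hmemkeys p hp)⟩
      have horder : (PySem.List.pyRange m (-1) (-1)).foldl
          (fun acc d => acc ++ bk.getD d []) [] =
          (PySem.List.sorted nd.items (fun x => x.2) true).map (fun p => p.1) := by
        rw [PySem.List.foldl_append_eq_flatMap, List.nil_append]
        have : (PySem.List.pyRange m (-1) (-1)).flatMap (fun d => bk.getD d []) =
            (PySem.List.pyRange m (-1) (-1)).flatMap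
              (fun d => (nd.items.filter (fun p => p.2 == d)).map (fun p => p.1)) := by
          exact List.flatMap_congr (fun d _ => hbget d)
        rw [this, ← List.map_flatMap,
          pv_flatMap_filter_eq_sorted (PySem.List.pyRange m (-1) (-1)) hds_pw nd.items hmemds]
      rw [show (match some m with
          | none => ([] : List String)
          | some m => (PySem.List.pyRange m (-1) (-1)).foldl (fun acc d => acc ++ bk.getD d []) [])
        = (PySem.List.pyRange m (-1) (-1)).foldl (fun acc d => acc ++ bk.getD d []) [] from rfl]
      rw [horder]
      rw [PySem.List.length_sorted]
      rw [show nd.size = nd.items.length from rfl]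
      rw [List.map_take]
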